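-- pv_equiv track=rewrite | github.com/FarazMoghimi/Forex_Prediction | codes/technical_indicator/indicator_helper.py | index_maxima
-- ===== SOURCE A (Python) =====
-- def index_last_maxima(data, i):
--     for j in range(3, i):
--         if i-j > 0 and data[i-j] > data[i-j+1] and data[i-j] > data[i-j+2] and data[i-j] > data[i-j-1] and data[i-j] > data[i-j-2]:
--             return i-j
--     return 0
--
-- def index_maxima(data, how_far=1):
--     res = []
--     for i in range(len(data)):
--         last_index = i
--         for j in range(how_far):
--             last_index = index_last_maxima(data, last_index)
--         res.append(last_index)
--     return res
-- ===== SOURCE B (Python) =====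
-- def index_maxima(data, how_far=1):
--     n = len(data)
--     # nearest[t] = largest peak index p <= t (peak: same 5-point test A uses,
--     # including Python's negative indexing of data[p-2] when p == 1), else 0.
--     nearest = [0] * n
--     best = 0
--     for p in range(n):
--         if 1 <= p < n - 2 and data[p] > data[p+1] and data[p] > data[p+2] \
--            and data[p] > data[p-1] and data[p] > data[p-2]:
--             best = p
--         nearest[p] = best
--     res = []
--     for i in range(n):
--         cur = i
--         for _ in range(how_far):
--             nxt = nearest[cur-3] if cur >= 3 else 0
--             if nxt == cur:
--                 break
--             cur = nxt
--         res.append(cur)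
--     return res
-- ===== Notes on version B (the rewrite author's own statement) =====
-- stated objective: faster
-- what changed: Replaces A's per-index backward rescan (index_last_maxima called how_far times per index, each an O(n) scan) with a single O(n) precomputed nearest-peak-so-far table, then an O(1)-per-step chase with early exit on a fixed point.
import Mathlib
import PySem

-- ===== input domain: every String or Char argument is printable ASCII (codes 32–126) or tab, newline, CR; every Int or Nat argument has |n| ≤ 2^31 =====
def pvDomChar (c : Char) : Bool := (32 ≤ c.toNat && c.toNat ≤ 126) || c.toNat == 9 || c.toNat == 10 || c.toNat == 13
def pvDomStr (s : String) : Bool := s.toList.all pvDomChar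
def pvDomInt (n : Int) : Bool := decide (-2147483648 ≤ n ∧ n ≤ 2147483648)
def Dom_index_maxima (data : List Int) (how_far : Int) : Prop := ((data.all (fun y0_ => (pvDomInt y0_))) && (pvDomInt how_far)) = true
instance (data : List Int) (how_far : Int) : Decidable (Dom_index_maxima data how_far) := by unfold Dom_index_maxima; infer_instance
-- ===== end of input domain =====

-- B replaces A's per-index backward rescan by a single O(n) precomputed nearest-peak table
-- plus an early-exit chase; same return value (objective: faster).
-- All data[·] accesses are in range (incl. Python negative wrap) whenever index_maxima calls
-- index_last_maxima, so pyGetD's default 0 is never the result of an out-of-range read.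

-- ===== PORT A =====
def ilmGo (data : List Int) (i : Int) : List Int → Int
  | [] => 0
  | j :: js =>
    if i - j > 0 ∧ PySem.List.pyGetD data (i-j) 0 > PySem.List.pyGetD data (i-j+1) 0
        ∧ PySem.List.pyGetD data (i-j) 0 > PySem.List.pyGetD data (i-j+2) 0
        ∧ PySem.List.pyGetD data (i-j) 0 > PySem.List.pyGetD data (i-j-1) 0
        ∧ PySem.List.pyGetD data (i-j) 0 > PySem.List.pyGetD data (i-j-2) 0
    then i - j else ilmGo data i js

def index_last_maxima (data : List Int) (i : Int) : Int :=
  ilmGo data i (PySem.List.pyRange 3 i 1)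

def index_maxima (data : List Int) (how_far : Int) : List Int :=
  (PySem.List.pyRange 0 (data.length : Int) 1).foldl
    (fun res i =>
      res ++ [(PySem.List.pyRange 0 how_far 1).foldl
                (fun last _ => index_last_maxima data last) i])
    []

-- ===== PORT B =====
def peakB (data : List Int) (p : Int) : Bool :=
  decide (1 ≤ p) && decide (p < (data.length : Int) - 2)
  && decide (PySem.List.pyGetD data p 0 > PySem.List.pyGetD data (p+1) 0)
  && decide (PySem.List.pyGetD data p 0 > PySem.List.pyGetD data (p+2) 0)
  && decide (PySem.List.pyGetD data p 0 > PySem.List.pyGetD data (p-1) 0)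
  && decide (PySem.List.pyGetD data p 0 > PySem.List.pyGetD data (p-2) 0)

def buildNearest (data : List Int) : List Int :=
  ((PySem.List.pyRange 0 (data.length : Int) 1).foldl
    (fun (st : Int × List Int) p =>
      let best := if peakB data p then p else st.1
      (best, st.2 ++ [best]))
    (0, [])).2

def chainB (nearest : List Int) : Nat → Int → Int
  | 0, cur => cur
  | k+1, cur =>
    let nxt := if cur ≥ 3 then PySem.List.pyGetD nearest (cur-3) 0 else 0
    if nxt = cur then cur else chainB nearest k nxt

def index_maxima_alt (data : List Int) (how_far : Int) : List Int :=
  let nearest := buildNearest data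
  (PySem.List.pyRange 0 (data.length : Int) 1).foldl
    (fun res i => res ++ [chainB nearest how_far.toNat i]) []

-- ===== PRECONDITION & SPEC =====
def Spec_index_maxima (data : List Int) (how_far : Int) (out : List Int) : Prop := out = index_maxima_alt data how_far
instance (data : List Int) (how_far : Int) (out : List Int) : Decidable (Spec_index_maxima data how_far out) := by unfold Spec_index_maxima; infer_instance

-- ===== CLAIM (what is proved, stated in full; the proofs are below) =====
def Claim_equal_index_maxima : Prop := ∀ (data : List Int) (how_far : Int), Dom_index_maxima data how_far → Spec_index_maxima data how_far (index_maxima data how_far)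

-- ===== LEMMAS AND PROOFS =====

-- nearest peak ≤ t, as a downward scan (proof-side specification)
def mp (data : List Int) : Nat → Int
  | 0 => 0
  | t+1 => if peakB data ((t:Int)+1) then (t:Int)+1 else mp data t

-- Int-indexed version: 0 for negative arguments
def mpI (data : List Int) (t : Int) : Int :=
  if t < 0 then 0 else mp data t.toNat

theorem mp_nonneg (data : List Int) (t : Nat) : 0 ≤ mp data t := by
  induction t with
  | zero => simp [mp]
  | succ t ih => simp only [mp]; split <;> omega

theorem mp_le (data : List Int) (t : Nat) : mp data t ≤ (t : Int) := by
  induction t with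
  | zero => simp [mp]
  | succ t ih => simp only [mp]; split <;> push_cast <;> omega

theorem mpI_nonneg (data : List Int) (t : Int) : 0 ≤ mpI data t := by
  unfold mpI; split
  · omega
  · exact mp_nonneg data t.toNat

-- A's backward scan computes mpI
theorem ilmGo_eq (data : List Int) (i : Int) (hin : i ≤ (data.length : Int)) :
    ∀ (t : Nat) (j : Int), (t : Int) = i - j → 3 ≤ j →
      ilmGo data i (PySem.List.pyRange j i 1) = mp data t := by
  intro t
  induction t with
  | zero =>
    intro j ht hj
    rw [PySem.List.pyRange_one_eq_nil (by omega)]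
    simp [ilmGo, mp]
  | succ t ih =>
    intro j ht hj
    rw [PySem.List.pyRange_one_cons (by omega)]
    simp only [ilmGo]
    have hp : i - j = (t : Int) + 1 := by push_cast at ht ⊢; omega
    have hcond : (i - j > 0 ∧ PySem.List.pyGetD data (i-j) 0 > PySem.List.pyGetD data (i-j+1) 0
        ∧ PySem.List.pyGetD data (i-j) 0 > PySem.List.pyGetD data (i-j+2) 0
        ∧ PySem.List.pyGetD data (i-j) 0 > PySem.List.pyGetD data (i-j-1) 0
        ∧ PySem.List.pyGetD data (i-j) 0 > PySem.List.pyGetD data (i-j-2) 0)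
        ↔ peakB data ((t:Int)+1) = true := by
      rw [← hp]
      simp only [peakB, Bool.and_eq_true, decide_eq_true_eq]
      constructor
      · rintro ⟨h0, h1, h2, h3, h4⟩
        refine ⟨⟨⟨⟨⟨by omega, by omega⟩, h1⟩, h2⟩, h3⟩, h4⟩
      · rintro ⟨⟨⟨⟨⟨h0, hlt⟩, h1⟩, h2⟩, h3⟩, h4⟩
        exact ⟨by omega, h1, h2, h3, h4⟩
    rw [mp]
    split
    · next hc =>
      rw [if_pos (hcond.mp hc), hp]
    · next hc =>
      rw [if_neg (fun h => hc (hcond.mpr h))]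
      exact ih (j+1) (by omega) (by omega)

theorem ilm_eq (data : List Int) (i : Int) (h0 : 0 ≤ i) (hin : i ≤ (data.length : Int)) :
    index_last_maxima data i = mpI data (i - 3) := by
  unfold index_last_maxima mpI
  by_cases h3 : i < 3
  · rw [PySem.List.pyRange_one_eq_nil (by omega), if_pos (by omega)]
    simp [ilmGo]
  · rw [if_neg (by omega)]
    exact ilmGo_eq data i hin (i-3).toNat 3 (by omega) (by omega)

-- the build fold produces the map of mpI over the range
theorem build_go (data : List Int) :
    ∀ (t : Nat) (a : Int) (acc : List Int), 0 ≤ a → (t : Int) = (data.length : Int) - a →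
    ((PySem.List.pyRange a (data.length : Int) 1).foldl
      (fun (st : Int × List Int) p =>
        let best := if peakB data p then p else st.1
        (best, st.2 ++ [best]))
      (mpI data (a-1), acc)).2
    = acc ++ (PySem.List.pyRange a (data.length : Int) 1).map (fun p => mpI data p) := by
  intro t
  induction t with
  | zero =>
    intro a acc ha ht
    rw [PySem.List.pyRange_one_eq_nil (by omega)]
    simp
  | succ t ih =>
    intro a acc ha ht
    rw [PySem.List.pyRange_one_cons (by omega)]
    simp only [List.foldl_cons, List.map_cons]
    have hstep : (if peakB data a then a else mpI data (a-1)) = mpI data a := by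
      by_cases h0 : a = 0
      · subst h0
        have hpk : peakB data 0 = false := by simp [peakB]
        simp [hpk, mpI, mp]
      · have h2 : a.toNat = (a-1).toNat + 1 := by omega
        have h3 : ((a-1).toNat : Int) + 1 = a := by omega
        have hR : mpI data a = if peakB data a then a else mp data (a-1).toNat := by
          unfold mpI; rw [if_neg (by omega), h2, mp, h3]
        have hL : mpI data (a-1) = mp data (a-1).toNat := by
          unfold mpI; rw [if_neg (by omega)]
        rw [hL, hR]
    rw [← hstep]
    have := ih (a+1) (acc ++ [if peakB data a then a else mpI data (a-1)]) (by omega) (by omega)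
    have harg : a + 1 - 1 = a := by omega
    rw [harg] at this
    rw [hstep] at this ⊢
    simpa using this
theorem buildNearest_eq (data : List Int) :
    buildNearest data = (PySem.List.pyRange 0 (data.length : Int) 1).map (fun p => mpI data p) := by
  unfold buildNearest
  have h := build_go data data.length 0 [] (by omega) (by omega)
  have h0 : mpI data (0-1) = 0 := by unfold mpI; rw [if_pos (by omega)]
  rw [h0] at h
  simpa using h

theorem nearest_lookup (data : List Int) (t : Int) (h0 : 0 ≤ t) (h1 : t < (data.length : Int)) :
    PySem.List.pyGetD (buildNearest data) t 0 = mpI data t := by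
  rw [buildNearest_eq]
  exact PySem.List.pyGetD_map_pyRange_of_nonneg _ _ _ _ h0 h1

-- A's inner loop is iteration of index_last_maxima
theorem foldl_const_iterate {α : Type} (g : α → α) (l : List Int) (x : α) :
    l.foldl (fun s _ => g s) x = g^[l.length] x := by
  induction l generalizing x with
  | nil => simp
  | cons j js ih => simp [List.foldl_cons, ih, Function.iterate_succ_apply]

-- the early-exit chase equals plain iteration
theorem iterate_fixed {α : Type} (g : α → α) (x : α) (hx : g x = x) (k : Nat) : g^[k] x = x := by
  induction k with
  | zero => simp
  | succ k ih => rw [Function.iterate_succ_apply, hx, ih]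

theorem chain_eq (data : List Int) :
    ∀ (k : Nat) (cur : Int), 0 ≤ cur → cur < (data.length : Int) →
      chainB (buildNearest data) k cur = (index_last_maxima data)^[k] cur := by
  intro k
  induction k with
  | zero => intro cur _ _; simp [chainB]
  | succ k ih =>
    intro cur h0 h1
    have hn1 : (1 : Int) ≤ data.length := by omega
    have hnxt : (if cur ≥ 3 then PySem.List.pyGetD (buildNearest data) (cur-3) 0 else 0)
        = index_last_maxima data cur := by
      rw [ilm_eq data cur h0 (by omega)]
      by_cases h3 : cur ≥ 3
      · rw [if_pos h3, nearest_lookup data (cur-3) (by omega) (by omega)]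
      · rw [if_neg h3]; unfold mpI; rw [if_pos (by omega)]
    simp only [chainB, hnxt]
    split
    · next heq =>
      exact (iterate_fixed _ cur heq (k+1)).symm
    · next hne =>
      rw [Function.iterate_succ_apply]
      have hb0 : 0 ≤ index_last_maxima data cur := by
        rw [ilm_eq data cur h0 (by omega)]; exact mpI_nonneg data _
      have hb1 : index_last_maxima data cur < (data.length : Int) := by
        rw [ilm_eq data cur h0 (by omega)]
        unfold mpI
        split
        · omega
        · have := mp_le data (cur-3).toNat; omega
      exact ih (index_last_maxima data cur) hb0 hb1

-- ===== VERDICT (by name: the statement is the Claim_ definition above) =====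
theorem index_maxima_spec : Claim_equal_index_maxima := by
  intro data how_far _
  unfold Spec_index_maxima index_maxima index_maxima_alt
  rw [PySem.List.foldl_append_singleton_eq_map, PySem.List.foldl_append_singleton_eq_map]
  apply List.map_congr_left
  intro i hi
  rw [PySem.List.mem_pyRange_one] at hi
  rw [chain_eq data how_far.toNat i hi.1 hi.2,
      foldl_const_iterate (index_last_maxima data) _ i,
      PySem.List.length_pyRange_one]
  norm_num
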